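-- pv_equiv track=rewrite | github.com/CodingLL/lgb | feature_engineer.py | get_mj
-- ===== SOURCE A (Python) =====
-- def get_mj(domain_list):
--     sn = [d["support_or_negate"] for d in domain_list]
--     support_count = sn.count("support")
--     negate_count = sn.count("negate")
--     if support_count == negate_count:
--         return "baseless"
--     elif support_count > negate_count:
--         return "support"
--     else:
--         return "negate"
-- ===== SOURCE B (Python) =====
-- def get_mj(domain_list):
--     net = 0
--     for d in domain_list:
--         v = d["support_or_negate"]
--         if v == "support":
--             net += 1
--         elif v == "negate":
--             net -= 1
--     if net == 0:
--         return "baseless"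
--     return "support" if net > 0 else "negate"
-- ===== Notes on version B (the rewrite author's own statement) =====
-- stated objective: simpler
-- what changed: Replaces the extracted label list plus two .count scans and a count comparison with a single pass keeping one running net tally whose sign decides the verdict.
import Mathlib
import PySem

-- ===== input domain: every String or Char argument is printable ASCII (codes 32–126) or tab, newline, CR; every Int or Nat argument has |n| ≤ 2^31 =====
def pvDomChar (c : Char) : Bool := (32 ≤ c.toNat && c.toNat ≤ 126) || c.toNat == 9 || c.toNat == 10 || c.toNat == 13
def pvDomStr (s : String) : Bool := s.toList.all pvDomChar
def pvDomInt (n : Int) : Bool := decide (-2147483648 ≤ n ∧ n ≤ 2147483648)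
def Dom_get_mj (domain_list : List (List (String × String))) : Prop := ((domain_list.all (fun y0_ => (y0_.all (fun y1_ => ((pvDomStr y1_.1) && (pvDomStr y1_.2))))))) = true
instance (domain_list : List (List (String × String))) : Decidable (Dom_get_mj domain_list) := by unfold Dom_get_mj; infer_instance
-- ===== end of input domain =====

-- B replaces the label-list extraction plus two .count scans with one pass keeping a running net tally (simpler decomposition).


-- ===== PORT A =====
-- d["support_or_negate"]; under Pre_get_mj the key is present, so getD "" never supplies its default
def pvLookupSN (d : List (String × String)) : String :=
  ((PySem.Dict.mk d).get? "support_or_negate").getD ""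

def get_mj (domain_list : List (List (String × String))) : String :=
  let sn := domain_list.map pvLookupSN
  let support_count := PySem.List.count sn "support"
  let negate_count := PySem.List.count sn "negate"
  if support_count == negate_count then "baseless"
  else if support_count > negate_count then "support"
  else "negate"

-- ===== PORT B =====
def get_mj_alt (domain_list : List (List (String × String))) : String :=
  let net : Int := domain_list.foldl (fun net d =>
    let v := pvLookupSN d
    if v == "support" then net + 1
    else if v == "negate" then net - 1
    else net) 0
  if net == 0 then "baseless"
  else if net > 0 then "support"
  else "negate"

-- ===== PRECONDITION & SPEC =====
-- Pre_ excludes inputs where some dict lacks the key "support_or_negate": there Python A (and B) raise KeyError.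
def Pre_get_mj (domain_list : List (List (String × String))) : Prop :=
  (domain_list.all (fun d => (PySem.Dict.mk d).contains "support_or_negate")) = true
instance (domain_list : List (List (String × String))) : Decidable (Pre_get_mj domain_list) := by unfold Pre_get_mj; infer_instance
def pvWitness_get_mj : (List (List (String × String))) :=
  [[("support_or_negate", "support")], [("support_or_negate", "negate")], [("support_or_negate", "neutral")]]
def Spec_get_mj (domain_list : List (List (String × String))) (out : String) : Prop := out = get_mj_alt domain_list
instance (domain_list : List (List (String × String))) (out : String) : Decidable (Spec_get_mj domain_list out) := by unfold Spec_get_mj; infer_instance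

-- ===== CLAIM (what is proved, stated in full; the proofs are below) =====
def Claim_equal_get_mj : Prop := ∀ (domain_list : List (List (String × String))), Dom_get_mj domain_list → Pre_get_mj domain_list → Spec_get_mj domain_list (get_mj domain_list)

-- ===== LEMMAS AND PROOFS =====
lemma net_fold_eq (sn : List String) (acc : Int) :
    sn.foldl (fun net v =>
      if v == "support" then net + 1
      else if v == "negate" then net - 1
      else net) acc
    = acc + (sn.count "support" : Int) - (sn.count "negate" : Int) := by
  induction sn generalizing acc with
  | nil => simp
  | cons h t ih =>
      simp only [List.foldl_cons, ih, List.count_cons]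
      by_cases hs : h = "support" <;> by_cases hn : h = "negate" <;>
        simp [hs, hn] <;> omega

lemma judge_eq (sn : List String) :
    (if PySem.List.count sn "support" == PySem.List.count sn "negate" then "baseless"
     else if PySem.List.count sn "support" > PySem.List.count sn "negate" then "support"
     else "negate")
    = (let net : Int := sn.foldl (fun net v =>
        if v == "support" then net + 1
        else if v == "negate" then net - 1
        else net) 0;
       if net == 0 then "baseless"
       else if net > 0 then "support"
       else "negate") := by
  simp only [net_fold_eq, PySem.List.count_eq]
  split_ifs with h1 h2 h3 h4 h5 <;> first
    | rfl
    | (simp only [beq_iff_eq] at * ; omega)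

-- ===== VERDICT (by name: the statement is the Claim_ definition above) =====
theorem get_mj_spec : Claim_equal_get_mj := by
  intro dl _ _
  unfold Spec_get_mj get_mj get_mj_alt
  have h := judge_eq (dl.map pvLookupSN)
  rw [List.foldl_map] at h
  exact h
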